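-- pv_equiv track=rewrite | github.com/DmitryGubich/tasks | tasks/10_2023/15/get_latest_k_requests.py | get_latest_k_requests
-- ===== SOURCE A (Python) =====
-- def get_latest_k_requests(requests, K):
--     result = []
--
--     for request in reversed(requests):
--         if len(result) >= K:
--             break
--         if request not in result:
--             result.append(request)
--
--     return result
-- ===== SOURCE B (Python) =====
-- def get_latest_k_requests(requests, K):
--     unique = list(dict.fromkeys(reversed(requests)))
--     return unique[:max(K, 0)]
-- ===== Notes on version B (the rewrite author's own statement) =====
-- stated objective: faster
-- what changed: Replaces the explicit reverse loop with early-break and per-element O(n) list membership scans by a single dict.fromkeys dedup of the reversed list followed by a slice unique[:max(K,0)].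
import Mathlib
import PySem

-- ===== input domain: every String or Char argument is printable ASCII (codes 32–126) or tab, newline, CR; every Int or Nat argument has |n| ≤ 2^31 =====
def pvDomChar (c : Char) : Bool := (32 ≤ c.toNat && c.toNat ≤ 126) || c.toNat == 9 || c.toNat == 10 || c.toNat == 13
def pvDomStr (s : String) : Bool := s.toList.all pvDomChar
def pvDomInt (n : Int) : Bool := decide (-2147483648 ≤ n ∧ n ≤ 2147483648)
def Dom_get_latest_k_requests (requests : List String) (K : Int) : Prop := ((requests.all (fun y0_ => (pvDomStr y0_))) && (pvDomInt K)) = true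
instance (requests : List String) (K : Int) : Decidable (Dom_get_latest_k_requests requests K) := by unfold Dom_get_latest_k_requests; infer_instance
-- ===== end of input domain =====

-- B replaces A's reverse loop (early break + per-element membership scan) by one
-- dict.fromkeys dedup of the reversed list followed by a slice [:max(K,0)] (idiomatic).

-- ===== PORT A =====
-- the 'for request in reversed(requests)' loop with its break, as structural recursion on the reversed list
def pvLoopA (K : Int) : List String → List String → List String
  | [], result => result
  | request :: rest, result =>
    if K ≤ (result.length : Int) then result
    else if result.contains request then pvLoopA K rest result
    else pvLoopA K rest (result ++ [request])

def get_latest_k_requests (requests : List String) (K : Int) : List String :=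
  pvLoopA K requests.reverse []

-- ===== PORT B =====
-- list(dict.fromkeys(reversed(requests))) = PySem.List.dedup requests.reverse; unique[:max(K,0)] = slice
def get_latest_k_requests_alt (requests : List String) (K : Int) : List String :=
  PySem.List.slice (PySem.List.dedup requests.reverse) none (some (max K 0))

-- ===== PRECONDITION & SPEC =====
def Spec_get_latest_k_requests (requests : List String) (K : Int) (out : List String) : Prop := out = get_latest_k_requests_alt requests K
instance (requests : List String) (K : Int) (out : List String) : Decidable (Spec_get_latest_k_requests requests K out) := by unfold Spec_get_latest_k_requests; infer_instance

-- ===== CLAIM (what is proved, stated in full; the proofs are below) =====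
def Claim_equal_get_latest_k_requests : Prop := ∀ (requests : List String) (K : Int), Dom_get_latest_k_requests requests K → Spec_get_latest_k_requests requests K (get_latest_k_requests requests K)

-- ===== LEMMAS AND PROOFS =====

-- first-seen unique elements of the list that are not already in `seen`
def pvU : List String → List String → List String
  | [], _ => []
  | r :: rest, seen =>
    if seen.contains r then pvU rest seen else r :: pvU rest (seen ++ [r])

theorem pvLoopA_eq (K : Int) (l : List String) :
    ∀ res : List String, pvLoopA K l res = res ++ (pvU l res).take (K - res.length).toNat := by
  induction l with
  | nil => intro res; simp [pvLoopA, pvU]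
  | cons r rest ih =>
    intro res
    by_cases hK : K ≤ (res.length : Int)
    · have h0 : (K - res.length).toNat = 0 := by omega
      simp [pvLoopA, hK, h0]
    · by_cases hc : r ∈ res
      · simp [pvLoopA, hK, hc, pvU, ih res]
      · have hpos : (K - res.length).toNat = (K - (res.length + 1)).toNat + 1 := by omega
        simp [pvLoopA, hK, hc, pvU, ih (res ++ [r]), hpos, List.take_succ_cons]

theorem foldl_add_eq_pvU (l : List String) :
    ∀ seen : List String, l.foldl PySem.Set.add seen = seen ++ pvU l seen := by
  induction l with
  | nil => intro seen; simp [pvU]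
  | cons r rest ih =>
    intro seen
    by_cases hc : r ∈ seen
    · simp [pvU, hc, PySem.Set.add, List.foldl_cons, ih seen]
    · simp [pvU, hc, PySem.Set.add, List.foldl_cons, ih (seen ++ [r])]

theorem dedup_eq_pvU (l : List String) : PySem.List.dedup l = pvU l [] := by
  have h := foldl_add_eq_pvU l []
  simpa [PySem.List.dedup_eq_ofList, PySem.Set.ofList_eq_foldl] using h

-- ===== VERDICT (by name: the statement is the Claim_ definition above) =====
theorem get_latest_k_requests_spec : Claim_equal_get_latest_k_requests := by
  intro requests K _
  unfold Spec_get_latest_k_requests get_latest_k_requests get_latest_k_requests_alt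
  rw [pvLoopA_eq, dedup_eq_pvU, ← Int.toNat_eq_max, PySem.List.slice_to_natCast]
  simp
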